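-- pv_equiv track=rewrite | github.com/ytingchou/legacy-delphi-project-analyzer | src/legacy_delphi_project_analyzer/benchmarking.py | _summarize_feedback
-- ===== SOURCE A (Python) =====
-- from typing import Any
--
-- def _summarize_feedback(feedback_log: Any) -> dict[str, Any]:
--     if not isinstance(feedback_log, list):
--         return {"entries": 0, "accepted": 0, "rejected": 0, "needs_follow_up": 0}
--     return {
--         "entries": len(feedback_log),
--         "accepted": sum(1 for item in feedback_log if isinstance(item, dict) and item.get("status") == "accepted"),
--         "rejected": sum(1 for item in feedback_log if isinstance(item, dict) and item.get("status") == "rejected"),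
--         "needs_follow_up": sum(
--             1 for item in feedback_log if isinstance(item, dict) and item.get("status") == "needs_follow_up"
--         ),
--     }
-- ===== SOURCE B (Python) =====
-- def _summarize_feedback(feedback_log):
--     if not isinstance(feedback_log, list):
--         return {"entries": 0, "accepted": 0, "rejected": 0, "needs_follow_up": 0}
--     accepted = rejected = needs = 0
--     for item in feedback_log:
--         if isinstance(item, dict):
--             status = item.get("status")
--             if status == "accepted":
--                 accepted += 1
--             elif status == "rejected":
--                 rejected += 1
--             elif status == "needs_follow_up":
--                 needs += 1
--     return {"entries": len(feedback_log), "accepted": accepted, "rejected": rejected, "needs_follow_up": needs}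
-- ===== Notes on version B (the rewrite author's own statement) =====
-- stated objective: alternative
-- what changed: B replaces A's three separate generator-expression scans of feedback_log with a single accumulating pass that keeps three counters and increments the matching one per item.
import Mathlib
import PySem

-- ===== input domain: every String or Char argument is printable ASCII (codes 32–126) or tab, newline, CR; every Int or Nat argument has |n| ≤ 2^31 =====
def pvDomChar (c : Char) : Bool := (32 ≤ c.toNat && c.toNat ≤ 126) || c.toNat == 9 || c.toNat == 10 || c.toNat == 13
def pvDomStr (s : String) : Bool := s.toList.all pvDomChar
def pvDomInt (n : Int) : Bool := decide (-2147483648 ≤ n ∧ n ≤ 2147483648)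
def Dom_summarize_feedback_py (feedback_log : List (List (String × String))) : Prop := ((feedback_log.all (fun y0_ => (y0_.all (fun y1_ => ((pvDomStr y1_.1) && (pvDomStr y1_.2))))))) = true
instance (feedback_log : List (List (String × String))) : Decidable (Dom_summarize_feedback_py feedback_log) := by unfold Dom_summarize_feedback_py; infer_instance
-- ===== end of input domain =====

-- B makes a single accumulating pass with three counters instead of A's three separate scans (same cost class, different decomposition).
-- Under the type convention feedback_log is always a list of dicts, so A's isinstance guards are always true and both functions are total.

-- ===== PORT A =====
-- three independent 0/1 generator sums, one per status, as in A
def summarize_feedback_py (feedback_log : List (List (String × String))) : List (String × Int) :=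
  [("entries", PySem.List.len feedback_log),
   ("accepted", (feedback_log.map (fun item => if (PySem.Dict.mk item).get? "status" = some "accepted" then (1 : Int) else 0)).sum),
   ("rejected", (feedback_log.map (fun item => if (PySem.Dict.mk item).get? "status" = some "rejected" then (1 : Int) else 0)).sum),
   ("needs_follow_up", (feedback_log.map (fun item => if (PySem.Dict.mk item).get? "status" = some "needs_follow_up" then (1 : Int) else 0)).sum)]

-- ===== PORT B =====
-- one pass: the loop body of Source B as a step over the (accepted, rejected, needs) counter triple
def pvStepB (acc : Int × Int × Int) (item : List (String × String)) : Int × Int × Int :=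
  match (PySem.Dict.mk item).get? "status" with
  | some "accepted" => (acc.1 + 1, acc.2.1, acc.2.2)
  | some "rejected" => (acc.1, acc.2.1 + 1, acc.2.2)
  | some "needs_follow_up" => (acc.1, acc.2.1, acc.2.2 + 1)
  | _ => acc

def summarize_feedback_py_alt (feedback_log : List (List (String × String))) : List (String × Int) :=
  let c := feedback_log.foldl pvStepB (0, 0, 0)
  [("entries", PySem.List.len feedback_log),
   ("accepted", c.1), ("rejected", c.2.1), ("needs_follow_up", c.2.2)]

-- ===== PRECONDITION & SPEC =====
def Spec_summarize_feedback_py (feedback_log : List (List (String × String))) (out : List (String × Int)) : Prop := out = summarize_feedback_py_alt feedback_log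
instance (feedback_log : List (List (String × String))) (out : List (String × Int)) : Decidable (Spec_summarize_feedback_py feedback_log out) := by unfold Spec_summarize_feedback_py; infer_instance

-- ===== CLAIM (what is proved, stated in full; the proofs are below) =====
def Claim_equal_summarize_feedback_py : Prop := ∀ (feedback_log : List (List (String × String))), Dom_summarize_feedback_py feedback_log → Spec_summarize_feedback_py feedback_log (summarize_feedback_py feedback_log)

-- ===== LEMMAS AND PROOFS =====

-- the fold from an arbitrary start adds the three 0/1 sums componentwise
theorem pvFoldB_eq (feedback_log : List (List (String × String))) (a r n : Int) :
    feedback_log.foldl pvStepB (a, r, n) =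
      (a + (feedback_log.map (fun item => if (PySem.Dict.mk item).get? "status" = some "accepted" then (1 : Int) else 0)).sum,
       r + (feedback_log.map (fun item => if (PySem.Dict.mk item).get? "status" = some "rejected" then (1 : Int) else 0)).sum,
       n + (feedback_log.map (fun item => if (PySem.Dict.mk item).get? "status" = some "needs_follow_up" then (1 : Int) else 0)).sum) := by
  induction feedback_log generalizing a r n with
  | nil => simp
  | cons x xs ih =>
    simp only [List.foldl_cons, List.map_cons, List.sum_cons, pvStepB]
    rcases h : (PySem.Dict.mk x).get? "status" with _ | s
    · simp [ih]
    · by_cases h1 : s = "accepted"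
      · subst h1; simp [ih]; ring
      · by_cases h2 : s = "rejected"
        · subst h2; simp [ih]; ring
        · by_cases h3 : s = "needs_follow_up"
          · subst h3; simp [ih]; ring
          · simp [ih, h1, h2, h3]

-- ===== VERDICT (by name: the statement is the Claim_ definition above) =====
theorem summarize_feedback_py_spec : Claim_equal_summarize_feedback_py := by
  intro fl _
  unfold Spec_summarize_feedback_py summarize_feedback_py summarize_feedback_py_alt
  simp [pvFoldB_eq]
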